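-- pv_equiv track=rewrite | github.com/bkucukala/PYTHON_WORKSHOP | Clarusway_Codes/cc-003-find-the-largest-number/find-largest.py | the_biggest
-- ===== SOURCE A (Python) =====
-- def the_biggest(numberslist):
--     maximum=0
--     for i in numberslist :
--         try:
--             number=int(i)
--         except ValueError:
--             continue
--
--         if maximum < number :
--             maximum=number
--     return maximum
-- ===== SOURCE B (Python) =====
-- def _to_int(s):
--     try:
--         return int(s)
--     except ValueError:
--         return None
--
-- def the_biggest(numberslist):
--     nums = sorted([0] + [v for v in map(_to_int, numberslist) if v is not None])
--     return nums[-1]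
-- ===== Notes on version B (the rewrite author's own statement) =====
-- stated objective: alternative
-- what changed: A's fused running-max loop is replaced by parsing the convertible values, sorting them together with the 0 floor, and returning the last (largest) element of the sorted list.
import Mathlib
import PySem

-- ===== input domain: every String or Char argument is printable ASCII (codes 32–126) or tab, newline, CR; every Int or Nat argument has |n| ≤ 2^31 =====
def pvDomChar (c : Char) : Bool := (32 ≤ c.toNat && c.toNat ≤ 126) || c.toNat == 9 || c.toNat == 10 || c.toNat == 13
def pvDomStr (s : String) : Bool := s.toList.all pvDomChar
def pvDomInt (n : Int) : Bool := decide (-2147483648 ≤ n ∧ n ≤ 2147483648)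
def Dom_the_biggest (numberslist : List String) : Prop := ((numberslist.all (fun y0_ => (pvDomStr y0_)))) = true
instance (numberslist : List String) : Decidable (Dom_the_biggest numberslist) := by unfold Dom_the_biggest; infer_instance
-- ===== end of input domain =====

-- B replaces A's fused running-max loop by parse-then-sort-then-take-last (with the 0 floor kept by seeding the list with 0); objective: alternative algorithm.

-- ===== PORT A =====
-- literal port of A: running maximum starting at 0, skipping ValueError
def the_biggest (numberslist : List String) : Int :=
  numberslist.foldl
    (fun maximum i =>
      match PySem.Int.ofStr? i with
      | none => maximum            -- except ValueError: continue
      | some number => if maximum < number then number else maximum)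
    0

-- ===== PORT B =====
-- port of Source B: nums = sorted([0] + parsed values); return nums[-1]
def the_biggest_alt (numberslist : List String) : Int :=
  let nums := PySem.List.sorted ((0 : Int) :: numberslist.filterMap PySem.Int.ofStr?) (fun x => x) false
  match PySem.List.pyGet? nums (-1) with
  | some v => v
  | none => 0    -- unreachable: nums contains 0, so it is never empty

-- ===== PRECONDITION & SPEC =====
def Spec_the_biggest (numberslist : List String) (out : Int) : Prop := out = the_biggest_alt numberslist
instance (numberslist : List String) (out : Int) : Decidable (Spec_the_biggest numberslist out) := by unfold Spec_the_biggest; infer_instance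

-- ===== CLAIM =====
def Claim_equal_the_biggest : Prop := ∀ (numberslist : List String), Dom_the_biggest numberslist → Spec_the_biggest numberslist (the_biggest numberslist)

-- ===== LEMMAS AND PROOFS =====

-- A's branch is exactly max
theorem pv_branch_max (a n : Int) : (if a < n then n else a) = max a n := by
  rcases le_or_gt n a with h | h
  · simp [max_eq_left h]; omega
  · simp [max_eq_right (le_of_lt h), h]

-- A's loop over xs equals folding max over the filtered ints
theorem pv_foldA (xs : List String) (acc : Int) :
    xs.foldl
      (fun maximum i =>
        match PySem.Int.ofStr? i with
        | none => maximum
        | some number => if maximum < number then number else maximum)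
      acc
    = (xs.filterMap PySem.Int.ofStr?).foldl max acc := by
  induction xs generalizing acc with
  | nil => rfl
  | cons x t ih =>
    simp only [List.foldl_cons, List.filterMap_cons]
    cases h : PySem.Int.ofStr? x with
    | none => simp [ih]
    | some n =>
      simp only [List.foldl_cons]
      rw [pv_branch_max, ih]

-- in a ≤-sorted list every element is ≤ the last one
theorem pv_le_getLast (l : List Int) (h : l ≠ []) (hp : l.Pairwise (· ≤ ·)) :
    ∀ x ∈ l, x ≤ l.getLast h := by
  induction l with
  | nil => simp at h
  | cons a t ih =>
    rcases List.pairwise_cons.mp hp with ⟨ha, ht⟩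
    intro x hx
    cases t with
    | nil => simp_all
    | cons b s =>
      have htne : b :: s ≠ [] := by simp
      rw [List.getLast_cons htne]
      rcases List.mem_cons.mp hx with rfl | hxt
      · exact le_trans (ha _ (List.getLast_mem htne)) le_rfl
      · exact ih htne ht x hxt

-- the last element of sorted (a :: l) is the running max foldl max a l
theorem pv_getLast_sorted (a : Int) (l : List Int) :
    (PySem.List.sorted (a :: l) (fun x => x) false).getLast? = some (l.foldl max a) := by
  set s := PySem.List.sorted (a :: l) (fun x => x) false with hs
  have hperm : s.Perm (a :: l) := PySem.List.sorted_perm _ _ _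
  have hne : s ≠ [] := by
    intro h0
    have := hperm.length_eq
    simp [h0] at this
  have hp : s.Pairwise (· ≤ ·) := by
    have := PySem.List.sorted_pairwise (xs := a :: l) (key := fun x => x)
    simpa using this
  have hmax : PySem.List.max? (a :: l) (fun y => y) = some (l.foldl max a) :=
    PySem.List.max?_id_cons a l
  have hub : ∀ y ∈ (a :: l), y ≤ l.foldl max a := by
    intro y hy
    simpa using PySem.List.max?_isMax hmax y hy
  have hmem : l.foldl max a ∈ (a :: l) := PySem.List.max?_mem hmax
  have hlast_mem : s.getLast hne ∈ s := List.getLast_mem hne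
  have h1 : s.getLast hne ≤ l.foldl max a := hub _ (hperm.mem_iff.mp hlast_mem)
  have h2 : l.foldl max a ≤ s.getLast hne :=
    pv_le_getLast s hne hp _ (hperm.mem_iff.mpr hmem)
  rw [List.getLast?_eq_some_getLast hne]
  exact congrArg some (le_antisymm h1 h2)

-- ===== VERDICT =====
theorem the_biggest_spec : Claim_equal_the_biggest := by
  intro xs _
  unfold Spec_the_biggest the_biggest_alt the_biggest
  rw [pv_foldA]
  simp only [PySem.List.pyGet?_neg_one, pv_getLast_sorted]
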